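-- pv_equiv track=rewrite | github.com/Sneha-T8015/PythonPrograms | Antidiagonals.py | getAntiDiagonals
-- ===== SOURCE A (Python) =====
-- def getAntiDiagonals(matrix):
--   n=len(matrix)
--   l=2*n-1
--   antiD=[[0] for _ in range(l)]
--   for i in range(n):
--     for j in range(n):
--       antiD[i+j].append(matrix[i][j])
--   return antiD
-- ===== SOURCE B (Python) =====
-- def getAntiDiagonals(matrix):
--   n = len(matrix)
--   return [[0] + [matrix[i][d - i] for i in range(max(0, d - n + 1), min(d, n - 1) + 1)]
--           for d in range(2 * n - 1)]
-- ===== Notes on version B (the rewrite author's own statement) =====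
-- stated objective: alternative
-- what changed: Instead of scattering each cell into buckets via a row-major double loop with in-place appends, B gathers each antidiagonal directly: for every diagonal index d it builds [0] followed by matrix[i][d-i] for the valid i range, computed by index arithmetic.
import Mathlib
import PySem

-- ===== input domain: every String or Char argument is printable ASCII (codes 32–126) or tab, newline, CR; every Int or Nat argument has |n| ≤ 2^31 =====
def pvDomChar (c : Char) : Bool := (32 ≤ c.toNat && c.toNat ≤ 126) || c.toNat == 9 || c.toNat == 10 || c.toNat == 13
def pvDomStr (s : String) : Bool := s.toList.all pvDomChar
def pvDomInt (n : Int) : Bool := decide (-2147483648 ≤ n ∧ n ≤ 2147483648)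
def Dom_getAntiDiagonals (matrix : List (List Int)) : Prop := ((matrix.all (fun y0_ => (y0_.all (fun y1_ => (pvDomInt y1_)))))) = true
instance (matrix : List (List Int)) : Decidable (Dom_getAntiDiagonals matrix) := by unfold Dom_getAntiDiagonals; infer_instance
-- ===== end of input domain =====

-- B gathers each antidiagonal directly by index arithmetic instead of A's row-major
-- scatter into buckets; same return value on Pre_ (rows at least as long as the matrix).

-- ===== PORT A =====
-- literal port of A's scatter: buckets [[0],…], double loop appending matrix[i][j] to bucket i+j.
-- matrix[i][j] is ported as getD (in range under Pre_; Python raises outside Pre_).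
-- Nat '2*n-1' matches Python's range(2*n-1) (both empty for n = 0); index i+j is always ≥ 0.
def getAntiDiagonals (matrix : List (List Int)) : List (List Int) :=
  (List.range matrix.length).foldl
    (fun antiD i =>
      (List.range matrix.length).foldl
        (fun antiD j => antiD.modify (i + j) (· ++ [(matrix.getD i []).getD j 0]))
        antiD)
    ((List.range (2 * matrix.length - 1)).map (fun _ => ([0] : List Int)))

-- ===== PORT B =====
-- literal port of Source B: per diagonal d, [0] ++ [matrix[i][d-i] for i in range(max(0,d-n+1), min(d,n-1)+1)];
-- Nat subtraction 'd + 1 - n' is exactly max(0, d-n+1).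
def getAntiDiagonals_alt (matrix : List (List Int)) : List (List Int) :=
  (List.range (2 * matrix.length - 1)).map (fun d =>
    0 :: (List.range' (d + 1 - matrix.length)
            (min d (matrix.length - 1) + 1 - (d + 1 - matrix.length))).map
      (fun i => (matrix.getD i []).getD (d - i) 0))

-- ===== PRECONDITION & SPEC =====
-- Pre_ excludes ragged matrices whose rows are shorter than the matrix (Python A raises IndexError there).
def Pre_getAntiDiagonals (matrix : List (List Int)) : Prop :=
  ∀ row ∈ matrix, matrix.length ≤ row.length
instance (matrix : List (List Int)) : Decidable (Pre_getAntiDiagonals matrix) := by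
  unfold Pre_getAntiDiagonals; infer_instance
def pvWitness_getAntiDiagonals : List (List Int) := [[1, 2], [3, 4]]

def Spec_getAntiDiagonals (matrix : List (List Int)) (out : List (List Int)) : Prop := out = getAntiDiagonals_alt matrix
instance (matrix : List (List Int)) (out : List (List Int)) : Decidable (Spec_getAntiDiagonals matrix out) := by unfold Spec_getAntiDiagonals; infer_instance

-- ===== CLAIM (what is proved, stated in full; the proofs are below) =====
def Claim_equal_getAntiDiagonals : Prop := ∀ (matrix : List (List Int)), Dom_getAntiDiagonals matrix → Pre_getAntiDiagonals matrix → Spec_getAntiDiagonals matrix (getAntiDiagonals matrix)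

-- ===== LEMMAS AND PROOFS =====

-- scattering values into buckets: bucket d ends up as its start plus the values keyed d, in order
theorem scatter_getElem? {α : Type} (k : α → Nat) (v : α → Int)
    (ps : List α) (bs : List (List Int)) (d : Nat) :
    (ps.foldl (fun bs p => bs.modify (k p) (· ++ [v p])) bs)[d]?
      = (bs[d]?).map (· ++ ps.filterMap (fun p => if k p = d then some (v p) else none)) := by
  induction ps generalizing bs with
  | nil => simp
  | cons p ps ih =>
    simp only [List.foldl_cons, ih, List.getElem?_modify, List.filterMap_cons]
    by_cases hk : k p = d <;> cases bs[d]? <;> simp [hk]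

theorem flatMap_ite {p : Nat → Prop} [DecidablePred p] (l : List Nat) (w : Nat → Int) :
    l.flatMap (fun i => if p i then [w i] else []) = (l.filter (fun i => decide (p i))).map w := by
  induction l with
  | nil => simp
  | cons a l ih => by_cases h : p a <;> simp [h, ih]

theorem filter_range_eq_range' : ∀ (m lo hi : Nat), lo ≤ hi + 1 → hi < m →
    (List.range m).filter (fun i => decide (lo ≤ i ∧ i ≤ hi)) = List.range' lo (hi + 1 - lo) := by
  intro m
  induction m with
  | zero => intro lo hi _ h2; omega
  | succ n ih =>
    intro lo hi h1 h2
    rw [List.range_succ, List.filter_append]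
    by_cases hhi : hi < n
    · rw [ih lo hi h1 hhi]
      simp only [List.filter_cons, List.filter_nil]
      have : ¬ (lo ≤ n ∧ n ≤ hi) := by omega
      simp [this]
    · have hn : hi = n := by omega
      rw [hn] at h1 ⊢
      by_cases hlo : lo ≤ n
      · have e2 : ([n] : List Nat).filter (fun i => decide (lo ≤ i ∧ i ≤ n)) = [n] := by
          simp [hlo]
        by_cases hn0 : n = 0
        · rw [hn0] at e2 hlo ⊢
          have hl0 : lo = 0 := by omega
          rw [hl0] at e2 ⊢
          rw [e2]
          simp [List.range'_eq_map_range, List.range_succ]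
        · have heq : (List.range n).filter (fun i => decide (lo ≤ i ∧ i ≤ n))
              = (List.range n).filter (fun i => decide (lo ≤ i ∧ i ≤ n - 1)) := by
            apply List.filter_congr
            intro i hi
            rw [List.mem_range] at hi
            simp only [decide_eq_decide]
            omega
          rw [heq, ih lo (n - 1) (by omega) (by omega), e2]
          have h3 : n + 1 - lo = (n - lo) + 1 := by omega
          have h4 : n - 1 + 1 - lo = n - lo := by omega
          rw [h4, h3, List.range'_concat]
          congr 2
          omega
      · have e1 : (List.range n).filter (fun i => decide (lo ≤ i ∧ i ≤ n)) = [] := by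
          apply List.filter_eq_nil_iff.mpr
          intro i hi
          rw [List.mem_range] at hi
          simp only [decide_eq_true_eq]
          omega
        have e2 : ([n] : List Nat).filter (fun i => decide (lo ≤ i ∧ i ≤ n)) = [] := by
          simp
          omega
        have e3 : n + 1 - lo = 0 := by omega
        rw [e1, e2, e3]
        simp

-- the inner row scan keyed to diagonal d contributes exactly the cell at column d - i, if any
theorem inner_filterMap (i d : Nat) (v : Nat → Int) : ∀ n,
    (List.range n).filterMap (fun j => if i + j = d then some (v j) else none)
      = if i ≤ d ∧ d < i + n then [v (d - i)] else [] := by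
  intro n
  induction n with
  | zero => simp
  | succ n ih =>
    rw [List.range_succ, List.filterMap_append, ih]
    by_cases h : i + n = d
    · have h1 : ¬ (i ≤ d ∧ d < i + n) := by omega
      have h2 : (i ≤ d ∧ d < i + (n + 1)) := by omega
      have h3 : n = d - i := by omega
      rw [if_neg h1, if_pos h2]
      simp [h, ← h3]
    · have h1 : (i ≤ d ∧ d < i + n) ↔ (i ≤ d ∧ d < i + (n + 1)) := by omega
      simp only [List.filterMap_cons, if_neg h, List.filterMap_nil, List.append_nil]
      by_cases h2 : i ≤ d ∧ d < i + n
      · rw [if_pos h2, if_pos (h1.mp h2)]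
      · rw [if_neg h2, if_neg (fun hc => h2 (h1.mpr hc))]

-- the gathered list for diagonal d (B's inner list) equals A's per-diagonal contributions
theorem gather_eq (n d : Nat) (w : Nat → Int) (hd : d < 2 * n - 1) :
    (List.range n).flatMap (fun i => if i ≤ d ∧ d < i + n then [w i] else [])
      = (List.range' (d + 1 - n) (min d (n - 1) + 1 - (d + 1 - n))).map w := by
  rw [flatMap_ite]
  have hcong : (List.range n).filter (fun i => decide (i ≤ d ∧ d < i + n))
      = (List.range n).filter (fun i => decide (d + 1 - n ≤ i ∧ i ≤ min d (n - 1))) := by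
    apply List.filter_congr
    intro i hi
    rw [List.mem_range] at hi
    simp only [decide_eq_decide]
    omega
  rw [hcong, filter_range_eq_range' n (d + 1 - n) (min d (n - 1)) (by omega) (by omega)]

-- ===== VERDICT (by name: the statement is the Claim_ definition above) =====
theorem getAntiDiagonals_spec : Claim_equal_getAntiDiagonals := by
  intro matrix _ _
  unfold Spec_getAntiDiagonals
  set n := matrix.length with hn
  have hA : getAntiDiagonals matrix
      = ((List.range n).flatMap (fun i => (List.range n).map (fun j => (i, j)))).foldl
          (fun antiD p => antiD.modify (p.1 + p.2) (· ++ [(matrix.getD p.1 []).getD p.2 0]))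
          ((List.range (2 * n - 1)).map (fun _ => ([0] : List Int))) := by
    simp only [getAntiDiagonals, List.foldl_flatMap, List.foldl_map, hn]
  apply List.ext_getElem?
  intro d
  have hs := scatter_getElem? (fun p : Nat × Nat => p.1 + p.2)
    (fun p : Nat × Nat => (matrix.getD p.1 []).getD p.2 0)
    ((List.range n).flatMap (fun i => (List.range n).map (fun j => (i, j))))
    ((List.range (2 * n - 1)).map (fun _ => ([0] : List Int))) d
  rw [hA]
  simp only at hs
  rw [hs]
  rw [getAntiDiagonals_alt]
  simp only [← hn, List.getElem?_map]
  by_cases hd : d < 2 * n - 1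
  · rw [List.getElem?_range hd]
    simp only [Option.map_some]
    congr 1
    rw [List.filterMap_flatMap]
    have hin : ∀ i : Nat,
        ((List.range n).map (fun j => (i, j))).filterMap
          (fun p : Nat × Nat => if p.1 + p.2 = d then some ((matrix.getD p.1 []).getD p.2 0) else none)
        = if i ≤ d ∧ d < i + n then [(matrix.getD i []).getD (d - i) 0] else [] := by
      intro i
      rw [List.filterMap_map]
      exact inner_filterMap i d (fun j => (matrix.getD i []).getD j 0) n
    simp only [hin]
    rw [gather_eq n d (fun i => (matrix.getD i []).getD (d - i) 0) hd]
    rfl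
  · have h1 : (List.range (2 * n - 1))[d]? = none := by
      rw [List.getElem?_eq_none]
      simpa using by omega
    rw [h1]
    rfl
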